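-- pv_equiv track=rewrite | github.com/ChaseParate/Advent-of-Code-2020 | day06/part2.py | custom_customs
-- ===== SOURCE A (Python) =====
-- def custom_customs(puzzle_input):
--     sum_counts = 0
--
--     for group in puzzle_input:
--         lines = group.splitlines()
--         chars = set(char for char in group if char != '\n')
--         for char in chars:
--             if len([line for line in lines if char in line]) == len(lines):
--                 sum_counts += 1
--
--     return sum_counts
-- ===== SOURCE B (Python) =====
-- def custom_customs(puzzle_input):
--     total = 0
--     for group in puzzle_input:
--         lines = group.splitlines()
--         counts = {}
--         for line in lines:
--             for ch in set(line):
--                 counts[ch] = counts.get(ch, 0) + 1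
--         n = len(lines)
--         total += sum(1 for v in counts.values() if v == n)
--     return total
-- ===== Notes on version B (the rewrite author's own statement) =====
-- stated objective: alternative
-- what changed: Instead of rescanning every line of the group for each candidate character, B makes one pass over the group's lines building a frequency table of each line's distinct characters and then counts the table entries equal to the number of lines (measured ~1.4x, below the 1.5x bar, so not claimed as faster).
import Mathlib
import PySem

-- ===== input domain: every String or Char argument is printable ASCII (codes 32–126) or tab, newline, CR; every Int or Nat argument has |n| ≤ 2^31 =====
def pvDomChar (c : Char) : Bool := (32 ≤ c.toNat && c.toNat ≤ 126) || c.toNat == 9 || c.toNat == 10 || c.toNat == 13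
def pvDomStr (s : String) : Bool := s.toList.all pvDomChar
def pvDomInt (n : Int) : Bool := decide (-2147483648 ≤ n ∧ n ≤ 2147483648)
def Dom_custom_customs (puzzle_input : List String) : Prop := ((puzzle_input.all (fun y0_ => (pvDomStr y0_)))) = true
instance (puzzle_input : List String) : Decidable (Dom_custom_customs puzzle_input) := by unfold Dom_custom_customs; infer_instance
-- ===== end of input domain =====

-- B replaces A's rescan of all lines for every candidate character by one frequency table per group (one pass over the lines), then counts the table entries equal to the number of lines.

-- ===== PORT A =====
-- 'char in line' tests one single character, so it is exactly membership of that character in the line.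
def custom_customs (puzzle_input : List String) : Int :=
  puzzle_input.foldl
    (fun sum_counts group =>
      let lines := PySem.Str.splitlines group
      let chars : PySem.Set Char :=
        PySem.Set.ofList (group.toList.filter (fun char => char != '\n'))
      chars.foldl
        (fun s char =>
          if (lines.filter (fun line => line.toList.contains char)).length == lines.length
          then s + 1 else s)
        sum_counts)
    0

-- ===== PORT B =====
-- the count of values equal to n does not depend on the (unmodelled) Python set/dict iteration order
def custom_customs_alt (puzzle_input : List String) : Int :=
  puzzle_input.foldl
    (fun total group =>
      let lines := PySem.Str.splitlines group
      let counts : PySem.Dict Char Int :=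
        lines.foldl
          (fun counts line =>
            (PySem.Set.ofList line.toList).foldl
              (fun counts ch => counts.insert ch (counts.getD ch 0 + 1))
              counts)
          PySem.Dict.empty
      let n : Int := lines.length
      total + ((counts.values.filter (fun v => v == n)).length : Int))
    0

-- ===== PRECONDITION & SPEC =====
def Spec_custom_customs (puzzle_input : List String) (out : Int) : Prop := out = custom_customs_alt puzzle_input
instance (puzzle_input : List String) (out : Int) : Decidable (Spec_custom_customs puzzle_input out) := by unfold Spec_custom_customs; infer_instance

-- ===== CLAIM (what is proved, stated in full; the proofs are below) =====
def Claim_equal_custom_customs : Prop := ∀ (puzzle_input : List String), Dom_custom_customs puzzle_input → Spec_custom_customs puzzle_input (custom_customs puzzle_input)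

-- ===== LEMMAS AND PROOFS =====

-- the break-character predicate baked into PySem.Chars.splitlines
def pvIsB (c : Char) : Bool :=
  decide (c.toNat = 10) || decide (c.toNat = 13) || decide (c.toNat = 11) || decide (c.toNat = 12) ||
  decide (c.toNat = 28) || decide (c.toNat = 29) || decide (c.toNat = 30) || decide (c.toNat = 133) ||
  decide (c.toNat = 8232) || decide (c.toNat = 8233)

theorem pv_splitlines_eq (s : List Char) :
    PySem.Chars.splitlines s = PySem.Chars.splitlines.go pvIsB s [] [] := rfl

-- step equations for PySem.Chars.splitlines.go
theorem pv_go_nil (isB : Char → Bool) (cur : List Char) (acc : List (List Char)) :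
    PySem.Chars.splitlines.go isB [] cur acc
      = if cur.isEmpty then acc.reverse else (cur.reverse :: acc).reverse := by
  rw [PySem.Chars.splitlines.go.eq_def]

theorem pv_go_crlf (isB : Char → Bool) (rest cur : List Char) (acc : List (List Char)) :
    PySem.Chars.splitlines.go isB ('\r' :: '\n' :: rest) cur acc
      = PySem.Chars.splitlines.go isB rest [] (cur.reverse :: acc) := by
  rw [PySem.Chars.splitlines.go.eq_def]
  split
  · rename_i heq; simp at heq
  · rename_i r heq
    injection heq with h1 h2
    injection h2 with h3 h4
    subst h4; rfl
  · rename_i cc rr hx heq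
    exfalso
    injection heq with h1 h2
    exact hx rest h1.symm h2.symm

theorem pv_go_cons (isB : Char → Bool) (c : Char) (rest cur : List Char) (acc : List (List Char))
    (hne : ¬(c = '\r' ∧ ∃ r', rest = '\n' :: r')) :
    PySem.Chars.splitlines.go isB (c :: rest) cur acc
      = if isB c then PySem.Chars.splitlines.go isB rest [] (cur.reverse :: acc)
        else PySem.Chars.splitlines.go isB rest (c :: cur) acc := by
  rw [PySem.Chars.splitlines.go.eq_def]
  split
  · rename_i heq; simp at heq
  · rename_i r heq
    injection heq with h1 h2
    exact absurd ⟨h1, r, h2⟩ hne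
  · rename_i cc rr hx heq
    injection heq with h1 h2
    subst h1; subst h2; rfl

-- every character of every produced line comes from the input and is not a break character
theorem pv_go_mem (isB : Char → Bool) (h10 : isB '\n' = true) :
    ∀ (s cur : List Char) (acc : List (List Char)) (l : List Char) (c : Char),
      l ∈ PySem.Chars.splitlines.go isB s cur acc → c ∈ l →
      (c ∈ s ∧ isB c = false) ∨ c ∈ cur ∨ ∃ l' ∈ acc, c ∈ l' := by
  intro s
  induction s with
  | nil =>
    intro cur acc l c hl hc
    rw [pv_go_nil] at hl
    split at hl
    · right; right; exact ⟨l, List.mem_reverse.1 hl, hc⟩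
    · rcases List.mem_cons.1 (List.mem_reverse.1 hl) with h | h
      · right; left; exact List.mem_reverse.1 (h ▸ hc)
      · right; right; exact ⟨l, h, hc⟩
  | cons c1 s' ih =>
    intro cur acc l c hl hc
    by_cases hcr : c1 = '\r' ∧ ∃ r', s' = '\n' :: r'
    · obtain ⟨rfl, r', rfl⟩ := hcr
      rw [pv_go_crlf] at hl
      have hgo : PySem.Chars.splitlines.go isB ('\n' :: r') cur acc
          = PySem.Chars.splitlines.go isB r' [] (cur.reverse :: acc) := by
        rw [pv_go_cons isB _ _ _ _ (by simp), if_pos h10]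
      rcases ih cur acc l c (hgo ▸ hl) hc with ⟨h1, h2⟩ | h | h
      · exact Or.inl ⟨List.mem_cons_of_mem _ h1, h2⟩
      · exact Or.inr (Or.inl h)
      · exact Or.inr (Or.inr h)
    · rw [pv_go_cons isB _ _ _ _ hcr] at hl
      by_cases hb : isB c1 = true
      · rw [if_pos hb] at hl
        rcases ih [] (cur.reverse :: acc) l c hl hc with ⟨h1, h2⟩ | h | h
        · exact Or.inl ⟨List.mem_cons_of_mem _ h1, h2⟩
        · simp at h
        · rcases h with ⟨l', hl', hcl'⟩
          rcases List.mem_cons.1 hl' with rfl | hl''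
          · exact Or.inr (Or.inl (List.mem_reverse.1 hcl'))
          · exact Or.inr (Or.inr ⟨l', hl'', hcl'⟩)
      · rw [if_neg hb] at hl
        rcases ih (c1 :: cur) acc l c hl hc with ⟨h1, h2⟩ | h | h
        · exact Or.inl ⟨List.mem_cons_of_mem _ h1, h2⟩
        · rcases List.mem_cons.1 h with rfl | h'
          · exact Or.inl ⟨List.mem_cons_self, Bool.eq_false_iff.2 hb⟩
          · exact Or.inr (Or.inl h')
        · exact Or.inr (Or.inr h)

theorem pv_go_eq_nil (isB : Char → Bool) :
    ∀ (n : Nat) (s cur : List Char) (acc : List (List Char)), s.length = n →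
      PySem.Chars.splitlines.go isB s cur acc = [] → s = [] ∧ cur = [] ∧ acc = [] := by
  intro n
  induction n using Nat.strong_induction_on with
  | _ n ih =>
    intro s cur acc hlen h
    rcases s with _ | ⟨c1, s2⟩
    · rw [pv_go_nil] at h
      split at h <;> simp_all
    · by_cases hcr : c1 = '\r' ∧ ∃ r', s2 = '\n' :: r'
      · obtain ⟨rfl, r', rfl⟩ := hcr
        rw [pv_go_crlf] at h
        exact absurd (ih r'.length (by simp [← hlen]) r' [] _ rfl h).2.2 (by simp)
      · rw [pv_go_cons isB _ _ _ _ hcr] at h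
        by_cases hb : isB c1 = true
        · rw [if_pos hb] at h
          exact absurd (ih s2.length (by simp [← hlen]) s2 [] _ rfl h).2.2 (by simp)
        · rw [if_neg hb] at h
          exact absurd (ih s2.length (by simp [← hlen]) s2 _ _ rfl h).2.1 (by simp)

theorem pv_mem_line (g l : String) (c : Char)
    (hl : l ∈ PySem.Str.splitlines g) (hc : c ∈ l.toList) : c ∈ g.toList ∧ c ≠ '\n' := by
  have h1 : l.toList ∈ List.map String.toList (PySem.Str.splitlines g) :=
    List.mem_map_of_mem hl
  rw [PySem.Str.splitlines_map_toList, pv_splitlines_eq] at h1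
  rcases pv_go_mem pvIsB (by decide) g.toList [] [] l.toList c h1 hc with ⟨hm, hb⟩ | h | h
  · refine ⟨hm, fun hcn => ?_⟩
    subst hcn
    simp [pvIsB] at hb
  · simp at h
  · simp at h

theorem pv_splitlines_ne_nil (g : String) (hg : g.toList ≠ []) : PySem.Str.splitlines g ≠ [] := by
  intro h
  have h2 : List.map String.toList (PySem.Str.splitlines g) = [] := by rw [h]; rfl
  rw [PySem.Str.splitlines_map_toList, pv_splitlines_eq] at h2
  exact hg (pv_go_eq_nil pvIsB g.toList.length g.toList [] [] rfl h2).1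

theorem pv_count_ofList (c : Char) (xs : List Char) :
    List.count c (PySem.Set.ofList xs) = if c ∈ xs then 1 else 0 := by
  by_cases h : c ∈ xs
  · rw [if_pos h]
    exact List.count_eq_one_of_mem (PySem.Set.nodup_ofList xs) ((PySem.Set.mem_ofList xs c).2 h)
  · rw [if_neg h]
    exact List.count_eq_zero_of_not_mem (fun hm => h ((PySem.Set.mem_ofList xs c).1 hm))

theorem pv_count_flat (lines : List String) (c : Char) :
    List.count c (lines.flatMap (fun l => PySem.Set.ofList l.toList))
      = List.countP (fun l => l.toList.contains c) lines := by
  induction lines with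
  | nil => simp
  | cons l ls ih =>
    rw [List.flatMap_cons, List.count_append, ih, List.countP_cons, pv_count_ofList]
    by_cases h : c ∈ l.toList
    · simp [h]; omega
    · simp [h]

-- B's per-group dict is the counter of the per-line deduplicated characters
theorem pv_counts_eq (lines : List String) :
    lines.foldl
        (fun counts line =>
          (PySem.Set.ofList line.toList).foldl
            (fun counts ch => counts.insert ch (counts.getD ch 0 + 1)) counts)
        PySem.Dict.empty
      = PySem.Dict.counter (lines.flatMap (fun l => PySem.Set.ofList l.toList)) := by
  rw [← PySem.Dict.foldl_insert_getD_add_one_eq_counter, List.foldl_flatMap]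

-- the per-group counts of A and B coincide
theorem pv_group (g : String) :
    List.countP
        (fun c =>
          (List.filter (fun line => line.toList.contains c) (PySem.Str.splitlines g)).length
            == (PySem.Str.splitlines g).length)
        (PySem.Set.ofList (g.toList.filter (fun ch => ch != '\n')))
      = List.countP (fun v => v == ((PySem.Str.splitlines g).length : Int))
          ((PySem.Dict.counter
              ((PySem.Str.splitlines g).flatMap (fun l => PySem.Set.ofList l.toList))).values) := by
  rw [PySem.Dict.values_eq_map_keys _ (PySem.Dict.nodup_keys_counter _) 0, List.countP_map,
    PySem.Dict.keys_counter]
  rw [List.countP_eq_length_filter, List.countP_eq_length_filter]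
  apply List.Perm.length_eq
  apply (List.perm_ext_iff_of_nodup
    ((PySem.Set.nodup_ofList _).filter _) ((PySem.Set.nodup_ofList _).filter _)).2
  intro c
  simp only [List.mem_filter, PySem.Set.mem_ofList, Function.comp_apply,
    PySem.Dict.getD_counter, pv_count_flat, beq_iff_eq, bne_iff_ne, Nat.cast_inj,
    ← List.countP_eq_length_filter]
  constructor
  · rintro ⟨⟨hmem, hne⟩, hcnt⟩
    have hnil : PySem.Str.splitlines g ≠ [] :=
      pv_splitlines_ne_nil g (by intro h0; rw [h0] at hmem; simp at hmem)
    obtain ⟨l0, ls, hl0⟩ := List.exists_cons_of_ne_nil hnil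
    have hall := List.countP_eq_length.1 hcnt
    have hc0 : c ∈ l0.toList := by
      simpa using hall l0 (by rw [hl0]; exact List.mem_cons_self)
    exact ⟨List.mem_flatMap.2 ⟨l0, by rw [hl0]; exact List.mem_cons_self,
      (PySem.Set.mem_ofList _ _).2 hc0⟩, hcnt⟩
  · rintro ⟨hmem, hcnt⟩
    rcases List.mem_flatMap.1 hmem with ⟨l0, hl0, hcl0⟩
    rcases pv_mem_line g l0 c hl0 ((PySem.Set.mem_ofList _ _).1 hcl0) with ⟨hmg, hne⟩
    exact ⟨⟨hmg, hne⟩, hcnt⟩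

-- the two step functions agree, hence the two folds agree
theorem pv_step (s : Int) (group : String) :
    (PySem.Set.ofList (group.toList.filter (fun char => char != '\n'))).foldl
        (fun s char =>
          if (List.filter (fun line => line.toList.contains char)
                (PySem.Str.splitlines group)).length == (PySem.Str.splitlines group).length
          then s + 1 else s)
        s
      = s +
        ((((PySem.Str.splitlines group).foldl
              (fun counts line =>
                (PySem.Set.ofList line.toList).foldl
                  (fun counts ch => counts.insert ch (counts.getD ch 0 + 1)) counts)
              PySem.Dict.empty).values.filter
            (fun v => v == ((PySem.Str.splitlines group).length : Int))).length : Int) := by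
  rw [PySem.List.foldl_count_if, pv_counts_eq, ← List.countP_eq_length_filter, pv_group]

theorem pv_foldl (l : List String) : ∀ (s : Int),
    l.foldl
        (fun sum_counts group =>
          (PySem.Set.ofList (group.toList.filter (fun char => char != '\n'))).foldl
            (fun s char =>
              if (List.filter (fun line => line.toList.contains char)
                    (PySem.Str.splitlines group)).length == (PySem.Str.splitlines group).length
              then s + 1 else s)
            sum_counts)
        s
      = l.foldl
          (fun total group =>
            total +
              ((((PySem.Str.splitlines group).foldl
                    (fun counts line =>
                      (PySem.Set.ofList line.toList).foldl
                        (fun counts ch => counts.insert ch (counts.getD ch 0 + 1)) counts)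
                    PySem.Dict.empty).values.filter
                  (fun v => v == ((PySem.Str.splitlines group).length : Int))).length : Int))
          s := by
  induction l with
  | nil => intro s; rfl
  | cons g l ih =>
    intro s
    rw [List.foldl_cons, List.foldl_cons, pv_step, ih]

-- ===== VERDICT (by name: the statement is the Claim_ definition above) =====
theorem custom_customs_spec : Claim_equal_custom_customs := by
  intro puzzle_input _
  show custom_customs puzzle_input = custom_customs_alt puzzle_input
  exact pv_foldl puzzle_input 0
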